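-- pv_equiv track=rewrite | github.com/pkasemir/advent-of-code | 2015/day19/day19.py | to_element_list
-- ===== SOURCE A (Python) =====
-- def to_element_list(molecule:str):
--     elements = []
--     i = 0
--     while i < len(molecule):
--         if i + 1 >= len(molecule):
--             elements.append(molecule[i])
--             break
--         if molecule[i + 1].islower():
--             elements.append(molecule[i:i+2])
--             i += 1
--         else:
--             elements.append(molecule[i])
--         i += 1
--     return elements
-- ===== SOURCE B (Python) =====
-- def to_element_list(molecule: str):
--     # single pass over characters: a lowercase letter joins the previous
--     # token only if that token is still a single character
--     elements = []
--     for c in molecule: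
--         if c.islower() and elements and len(elements[-1]) == 1:
--             elements[-1] += c
--         else:
--             elements.append(c)
--     return elements
-- ===== Notes on version B (the rewrite author's own statement) =====
-- stated objective: simpler
-- what changed: Replaces the index-based while loop with one-step lookahead by a single for-each pass that attaches a lowercase character to the previous token when that token is still one character long.
import Mathlib
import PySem

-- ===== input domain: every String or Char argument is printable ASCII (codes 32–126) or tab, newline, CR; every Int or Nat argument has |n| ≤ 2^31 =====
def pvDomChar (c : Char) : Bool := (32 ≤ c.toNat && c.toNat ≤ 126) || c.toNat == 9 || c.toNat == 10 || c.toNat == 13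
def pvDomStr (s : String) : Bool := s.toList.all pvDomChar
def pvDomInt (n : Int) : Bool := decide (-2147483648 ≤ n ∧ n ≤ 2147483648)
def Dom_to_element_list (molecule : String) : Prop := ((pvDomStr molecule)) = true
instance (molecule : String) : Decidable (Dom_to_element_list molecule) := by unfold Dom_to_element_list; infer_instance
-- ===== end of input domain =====

-- B replaces A's index/lookahead while-loop by a single for-each pass that joins a
-- lowercase character onto a still-one-character previous token (simpler decomposition).


-- ===== PORT A =====
-- A's while loop advances i by 2 when the next char is lowercase, else by 1, and
-- breaks after appending the last single char: the obvious structural recursion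
-- on the remaining characters.
def goA : List Char → List String
  | [] => []
  | [c] => [String.mk [c]]
  | c :: d :: rest =>
      if PySem.Chars.islower d then
        String.mk [c, d] :: goA rest
      else
        String.mk [c] :: goA (d :: rest)

def to_element_list (molecule : String) : List String := goA molecule.toList

-- ===== PORT B =====
-- B's fold step: tokens kept newest-first (so 'elements[-1]' is the head).
def goB (acc : List (List Char)) (c : Char) : List (List Char) :=
  match acc with
  | [] => [[c]]
  | t :: rest =>
      if PySem.Chars.islower c && (t.length == 1) then
        (t ++ [c]) :: rest
      else
        [c] :: t :: rest

def to_element_list_alt (molecule : String) : List String :=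
  ((molecule.toList.foldl goB []).reverse).map String.mk

-- ===== PRECONDITION & SPEC =====
def Spec_to_element_list (molecule : String) (out : List String) : Prop := out = to_element_list_alt molecule
instance (molecule : String) (out : List String) : Decidable (Spec_to_element_list molecule out) := by unfold Spec_to_element_list; infer_instance

-- ===== CLAIM (what is proved, stated in full; the proofs are below) =====
def Claim_equal_to_element_list : Prop := ∀ (molecule : String), Dom_to_element_list molecule → Spec_to_element_list molecule (to_element_list molecule)

-- ===== LEMMAS AND PROOFS =====

-- tokens below the head of the accumulator are inert: they ride along unchanged
theorem foldl_goB_tail (l : List Char) : ∀ (t : List Char) (rest : List (List Char)),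
    l.foldl goB (t :: rest) = l.foldl goB [t] ++ rest := by
  induction l with
  | nil => intro t rest; simp
  | cons c l ih =>
      intro t rest
      simp only [List.foldl_cons, goB]
      by_cases h : (PySem.Chars.islower c && (t.length == 1)) = true
      · rw [if_pos h, if_pos h, ih (t ++ [c]) rest]
      · rw [if_neg h, if_neg h, ih [c] (t :: rest), ih [c] [t]]
        simp

-- a head token of length ≠ 1 is never joined: it is emitted below everything new
theorem foldl_goB_heavy (t : List Char) (ht : (t.length == 1) = false) (l : List Char) :
    l.foldl goB [t] = l.foldl goB [] ++ [t] := by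
  cases l with
  | nil => simp
  | cons c l =>
      rw [List.foldl_cons, List.foldl_cons,
        show goB [t] c = [c] :: [t] from by simp [goB, ht],
        show goB [] c = [[c]] from rfl]
      exact foldl_goB_tail l [c] [t]

theorem main_eq (l : List Char) :
    ((l.foldl goB []).reverse).map String.mk = goA l := by
  induction l using goA.induct with
  | case1 => simp [goA]
  | case2 c => simp [goA, goB]
  | case3 c d rest h ih =>
      rw [List.foldl_cons, List.foldl_cons,
        show goB [] c = [[c]] from rfl,
        show goB [[c]] d = [[c, d]] from by simp [goB, h],
        foldl_goB_heavy [c, d] (by simp)]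
      simp [goA, h, ih]
  | case4 c d rest h ih =>
      rw [List.foldl_cons, List.foldl_cons,
        show goB [] c = [[c]] from rfl,
        show goB [[c]] d = [[d], [c]] from by simp [goB, h],
        foldl_goB_tail rest [d] [[c]]]
      rw [List.foldl_cons, show goB [] d = [[d]] from rfl] at ih
      simp [goA, h, ← ih]

-- ===== VERDICT (by name: the statement is the Claim_ definition above) =====
theorem to_element_list_spec : Claim_equal_to_element_list := by
  intro molecule _
  unfold Spec_to_element_list to_element_list to_element_list_alt
  exact (main_eq molecule.toList).symm
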